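-- pv_equiv track=rewrite | github.com/jonhedson/nikola | nikola/plugins/command/new.py | filter_post_pages
-- ===== SOURCE A (Python) =====
-- def filter_post_pages(compiler, is_post, compilers, post_pages):
--     """Given a compiler ("markdown", "rest"), and whether it's meant for
--     a post or a page, and compilers, return the correct entry from
--     post_pages."""
--
--     # First throw away all the post_pages with the wrong is_post
--     filtered = [entry for entry in post_pages if entry[3] == is_post]
--
--     # These are the extensions supported by the required format
--     extensions = compilers[compiler]
--
--     # Throw away the post_pages with the wrong extensions
--     filtered = [entry for entry in filtered if any([ext in entry[0] for ext in
--                                                     extensions])]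
--
--     if not filtered:
--         type_name = "post" if is_post else "page"
--         raise Exception("Can't find a way, using your configuration, to create "
--                         "a {0} in format {1}. You may want to tweak "
--                         "COMPILERS or {2}S in conf.py".format(
--                             type_name, compiler, type_name.upper()))
--     return filtered[0]
-- ===== SOURCE B (Python) =====
-- def filter_post_pages(compiler, is_post, compilers, post_pages):
--     """Given a compiler ("markdown", "rest"), and whether it's meant for
--     a post or a page, and compilers, return the correct entry from
--     post_pages."""
--     extensions = compilers[compiler]
--     for entry in post_pages:
--         if entry[3] == is_post and any(ext in entry[0] for ext in extensions):
--             return entry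
--     type_name = "post" if is_post else "page"
--     raise Exception("Can't find a way, using your configuration, to create "
--                     "a {0} in format {1}. You may want to tweak "
--                     "COMPILERS or {2}S in conf.py".format(
--                         type_name, compiler, type_name.upper()))
-- ===== Notes on version B (the rewrite author's own statement) =====
-- stated objective: simpler
-- what changed: B replaces A's two materialized list comprehensions plus an emptiness check by a single early-exit scan over post_pages that returns the first entry matching both the is_post flag and an extension substring test; the compilers[compiler] lookup is hoisted before the loop so KeyError timing is unchanged.
import Mathlib
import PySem

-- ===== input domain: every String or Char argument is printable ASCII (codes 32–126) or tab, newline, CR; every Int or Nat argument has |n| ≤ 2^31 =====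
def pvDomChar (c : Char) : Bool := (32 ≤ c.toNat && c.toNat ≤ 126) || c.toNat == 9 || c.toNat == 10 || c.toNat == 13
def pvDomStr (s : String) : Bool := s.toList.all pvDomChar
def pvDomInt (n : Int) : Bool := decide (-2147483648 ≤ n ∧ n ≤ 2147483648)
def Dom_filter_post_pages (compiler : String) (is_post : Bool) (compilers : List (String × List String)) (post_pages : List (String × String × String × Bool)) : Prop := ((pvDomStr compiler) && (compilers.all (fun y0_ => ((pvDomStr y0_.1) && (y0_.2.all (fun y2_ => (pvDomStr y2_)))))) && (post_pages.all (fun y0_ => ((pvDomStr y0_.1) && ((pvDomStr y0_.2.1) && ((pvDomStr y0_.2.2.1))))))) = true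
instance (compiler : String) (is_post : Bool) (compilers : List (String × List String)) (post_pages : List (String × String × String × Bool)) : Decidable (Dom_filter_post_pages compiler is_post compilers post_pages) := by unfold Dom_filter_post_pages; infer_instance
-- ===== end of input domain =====

-- ===== PORT A =====
-- B changes: one early-exit scan instead of two materialized filtered lists (objective: simpler).
-- Both ports return ("","","",false) exactly where the Python raises; Pre_ excludes those inputs.
-- dict lookup (first match in the association list)
def pvLookup (compilers : List (String × List String)) (k : String) : Option (List String) :=
  (compilers.find? (fun p => p.1 == k)).map (·.2)

def filter_post_pages (compiler : String) (is_post : Bool) (compilers : List (String × List String)) (post_pages : List (String × String × String × Bool)) : String × String × String × Bool :=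
  -- filtered = [entry for entry in post_pages if entry[3] == is_post]
  let filtered := post_pages.filter (fun e => e.2.2.2 == is_post)
  -- extensions = compilers[compiler]  (KeyError = none, excluded by Pre_)
  let extensions := (pvLookup compilers compiler).getD []
  -- filtered = [entry for entry in filtered if any(ext in entry[0] for ext in extensions)]
  let filtered2 := filtered.filter (fun e => extensions.any (fun ext => PySem.Str.isIn ext e.1))
  -- if not filtered: raise  (excluded by Pre_); return filtered[0]
  filtered2.headD ("", "", "", false)

-- ===== PORT B =====
-- the for-loop with early return in Source B
def pvFindEntry (is_post : Bool) (extensions : List String) : List (String × String × String × Bool) → String × String × String × Bool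
  | [] => ("", "", "", false)
  | e :: rest =>
    if e.2.2.2 == is_post && extensions.any (fun ext => PySem.Str.isIn ext e.1) then e
    else pvFindEntry is_post extensions rest

def filter_post_pages_alt (compiler : String) (is_post : Bool) (compilers : List (String × List String)) (post_pages : List (String × String × String × Bool)) : String × String × String × Bool :=
  match pvLookup compilers compiler with
  | none => ("", "", "", false)  -- KeyError, excluded by Pre_
  | some extensions => pvFindEntry is_post extensions post_pages

-- ===== PRECONDITION & SPEC =====
-- Pre_ excludes exactly the inputs on which A raises: compiler missing from compilers (KeyError)
-- or no entry with the right is_post flag containing one of the extensions (the explicit raise).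
def Pre_filter_post_pages (compiler : String) (is_post : Bool) (compilers : List (String × List String)) (post_pages : List (String × String × String × Bool)) : Prop :=
  (pvLookup compilers compiler).isSome = true ∧
  post_pages.any (fun e => e.2.2.2 == is_post &&
    ((pvLookup compilers compiler).getD []).any (fun ext => PySem.Str.isIn ext e.1)) = true
instance (compiler : String) (is_post : Bool) (compilers : List (String × List String)) (post_pages : List (String × String × String × Bool)) : Decidable (Pre_filter_post_pages compiler is_post compilers post_pages) := by unfold Pre_filter_post_pages; infer_instance

def pvWitness_filter_post_pages : String × Bool × (List (String × List String)) × (List (String × String × String × Bool)) :=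
  ("markdown", true, [("markdown", [".md"])], [("pages/*.md", "p", "t", false), ("posts/*.md", "o", "t", true)])

def Spec_filter_post_pages (compiler : String) (is_post : Bool) (compilers : List (String × List String)) (post_pages : List (String × String × String × Bool)) (out : String × String × String × Bool) : Prop := out = filter_post_pages_alt compiler is_post compilers post_pages
instance (compiler : String) (is_post : Bool) (compilers : List (String × List String)) (post_pages : List (String × String × String × Bool)) (out : String × String × String × Bool) : Decidable (Spec_filter_post_pages compiler is_post compilers post_pages out) := by unfold Spec_filter_post_pages; infer_instance

-- ===== CLAIM (what is proved, stated in full; the proofs are below) =====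
def Claim_equal_filter_post_pages : Prop := ∀ (compiler : String) (is_post : Bool) (compilers : List (String × List String)) (post_pages : List (String × String × String × Bool)), Dom_filter_post_pages compiler is_post compilers post_pages → Pre_filter_post_pages compiler is_post compilers post_pages → Spec_filter_post_pages compiler is_post compilers post_pages (filter_post_pages compiler is_post compilers post_pages)

-- ===== LEMMAS AND PROOFS =====
-- head (with default) of the doubly filtered list = the early-exit scan
theorem filterFilter_headD_eq_find (is_post : Bool) (exts : List String)
    (l : List (String × String × String × Bool)) :
    (((l.filter (fun e => e.2.2.2 == is_post)).filter
        (fun e => exts.any (fun ext => PySem.Str.isIn ext e.1))).headD ("", "", "", false))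
      = pvFindEntry is_post exts l := by
  induction l with
  | nil => rfl
  | cons e rest ih =>
    cases h1 : (e.2.2.2 == is_post) <;>
    cases h2 : (exts.any (fun ext => PySem.Str.isIn ext e.1)) <;>
    simp only [List.filter_cons, pvFindEntry, h1, h2, Bool.and_false, Bool.and_true,
      Bool.false_eq_true, if_true, if_false, List.headD_cons, ih]

-- ===== VERDICT (by name: the statement is the Claim_ definition above) =====
theorem filter_post_pages_spec : Claim_equal_filter_post_pages := by
  intro compiler is_post compilers post_pages _hDom hPre
  obtain ⟨hSome, _⟩ := hPre
  unfold Spec_filter_post_pages filter_post_pages filter_post_pages_alt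
  obtain ⟨exts, hexts⟩ := Option.isSome_iff_exists.mp hSome
  rw [hexts]
  simpa [hexts] using filterFilter_headD_eq_find is_post exts post_pages
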